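-- pv_equiv track=rewrite | github.com/ranahussnain211456-beep/pinsave | server.py | pick_best_quality
-- ===== SOURCE A (Python) =====
-- QUALITY_PREFERENCE = ["2160", "1080", "720", "480", "360"]
--
-- def pick_best_quality(sources: list) -> dict | None:
--     """Select the highest quality source from a list."""
--     if not sources:
--         return None
--     # Try quality preference in order
--     for preferred in QUALITY_PREFERENCE:
--         for src in sources:
--             q   = str(src.get("quality", "")).lower()
--             url = src.get("url", "").lower()
--             if preferred in q or preferred in url:
--                 return src
--     # Fallback: return first available
--     return sources[0]
-- ===== SOURCE B (Python) =====
-- QUALITY_PREFERENCE = ["2160", "1080", "720", "480", "360"]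
--
--
-- def _rank(src):
--     """Index of the best quality tag found in this source (len = no match)."""
--     q = str(src.get("quality", "")).lower()
--     url = src.get("url", "").lower()
--     i = 0
--     for p in QUALITY_PREFERENCE:
--         if p in q or p in url:
--             return i
--         i += 1
--     return i
--
--
-- def pick_best_quality(sources: list) -> dict | None:
--     """Select the highest quality source from a list."""
--     if not sources:
--         return None
--     return min(sources, key=_rank)
-- ===== Notes on version B (the rewrite author's own statement) =====
-- stated objective: idiomatic
-- what changed: Replaces the 5 preference-major scans over sources with a single min(sources, key=rank) where rank maps each source once to its best preference index (len when none matches, so min's first-minimum tie-break also yields the sources[0] fallback).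
import Mathlib
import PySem

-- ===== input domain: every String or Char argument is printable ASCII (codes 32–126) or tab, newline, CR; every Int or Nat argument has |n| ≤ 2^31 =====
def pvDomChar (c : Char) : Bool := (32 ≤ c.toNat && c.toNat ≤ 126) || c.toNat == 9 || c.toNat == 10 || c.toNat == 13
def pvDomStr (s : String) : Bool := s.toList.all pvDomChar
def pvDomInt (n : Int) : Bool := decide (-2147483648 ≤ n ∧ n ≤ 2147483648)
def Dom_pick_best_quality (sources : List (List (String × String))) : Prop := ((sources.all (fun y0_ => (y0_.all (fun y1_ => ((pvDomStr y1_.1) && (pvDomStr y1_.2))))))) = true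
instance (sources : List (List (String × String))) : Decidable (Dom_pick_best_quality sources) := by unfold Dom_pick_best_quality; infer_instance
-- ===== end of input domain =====

-- B replaces A's five preference-major scans with one min-by-rank pass over the
-- sources (objective: idiomatic single pass); return value only, no mutation.

def QUALITY_PREFERENCE : List String := ["2160", "1080", "720", "480", "360"]

-- shared accessor: `preferred in str(src.get("quality","")).lower() or preferred in src.get("url","").lower()`
def pvMatch (preferred : String) (src : List (String × String)) : Bool :=
  let q := PySem.Str.lower ((PySem.Dict.mk src).getD "quality" "")
  let url := PySem.Str.lower ((PySem.Dict.mk src).getD "url" "")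
  PySem.Str.isIn preferred q || PySem.Str.isIn preferred url

-- ===== PORT A =====
-- inner `for src in sources: … return src`
def pvScanSources (preferred : String) : List (List (String × String)) → Option (List (String × String))
  | [] => none
  | src :: rest => if pvMatch preferred src then some src else pvScanSources preferred rest

-- outer `for preferred in QUALITY_PREFERENCE:`
def pvScanPrefs : List String → List (List (String × String)) → Option (List (String × String))
  | [], _ => none
  | p :: ps, sources =>
      match pvScanSources p sources with
      | some src => some src
      | none => pvScanPrefs ps sources

def pick_best_quality (sources : List (List (String × String))) : Option (List (String × String)) :=
  match sources with
  | [] => none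
  | first :: _ =>
      match pvScanPrefs QUALITY_PREFERENCE sources with
      | some src => some src
      | none => some first   -- fallback: sources[0]

-- ===== PORT B =====
-- `_rank`'s counting loop over QUALITY_PREFERENCE
def pvRankGo (src : List (String × String)) : List String → Nat → Nat
  | [], i => i
  | p :: ps, i => if pvMatch p src then i else pvRankGo src ps (i + 1)

def pvRank (src : List (String × String)) : Nat :=
  pvRankGo src QUALITY_PREFERENCE 0

def pick_best_quality_alt (sources : List (List (String × String))) : Option (List (String × String)) :=
  match sources with
  | [] => none
  | _ :: _ => PySem.List.min? sources pvRank   -- min(sources, key=_rank)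

-- ===== PRECONDITION & SPEC =====
def Spec_pick_best_quality (sources : List (List (String × String))) (out : Option (List (String × String))) : Prop := out = pick_best_quality_alt sources
instance (sources : List (List (String × String))) (out : Option (List (String × String))) : Decidable (Spec_pick_best_quality sources out) := by unfold Spec_pick_best_quality; infer_instance

-- ===== CLAIM (what is proved, stated in full; the proofs are below) =====
def Claim_equal_pick_best_quality : Prop := ∀ (sources : List (List (String × String))), Dom_pick_best_quality sources → Spec_pick_best_quality sources (pick_best_quality sources)

-- ===== LEMMAS AND PROOFS =====

-- rank with an accumulator is a shift of the accumulator-free rank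
def pvRank' (src : List (String × String)) : List String → Nat
  | [] => 0
  | p :: ps => if pvMatch p src then 0 else pvRank' src ps + 1

theorem pvRankGo_eq (src : List (String × String)) :
    ∀ (ps : List String) (i : Nat), pvRankGo src ps i = i + pvRank' src ps := by
  intro ps
  induction ps with
  | nil => intro i; simp [pvRankGo, pvRank']
  | cons p ps ih =>
      intro i
      by_cases h : pvMatch p src = true
      · simp [pvRankGo, pvRank', h]
      · simp only [pvRankGo, pvRank', if_neg h]
        rw [ih]
        omega

-- the foldl step of PySem.List.min?
def pvStep (key : List (String × String) → Nat)
    (acc : Option (List (String × String))) (x : List (String × String)) :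
    Option (List (String × String)) :=
  match acc with
  | none => some x
  | some m => if key x < key m then some x else some m

theorem min?_eq_foldl_pvStep (key : List (String × String) → Nat)
    (xs : List (List (String × String))) :
    PySem.List.min? xs key = xs.foldl (pvStep key) none := by
  unfold PySem.List.min?
  generalize (none : Option (List (String × String))) = acc
  induction xs generalizing acc with
  | nil => rfl
  | cons x xs ih =>
      simp only [List.foldl_cons]
      cases acc with
      | none => exact ih _
      | some m => exact ih _

-- a held minimum of key 0 is never replaced
theorem foldl_keep_zero (key : List (String × String) → Nat)
    (xs : List (List (String × String))) (b : List (String × String)) (hb : key b = 0) :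
    xs.foldl (pvStep key) (some b) = some b := by
  induction xs with
  | nil => rfl
  | cons x xs ih => simp [List.foldl_cons, pvStep, hb, ih]

-- constant key: the first element wins
theorem foldl_const_key (key : List (String × String) → Nat)
    (xs : List (List (String × String))) (b : List (String × String))
    (hconst : ∀ s, key s = key b) :
    xs.foldl (pvStep key) (some b) = some b := by
  induction xs with
  | nil => rfl
  | cons x xs ih => simp [List.foldl_cons, pvStep, hconst x, ih]

-- keys agreeing on the traversed elements and the carried candidate give the same fold
theorem foldl_key_congr (key₁ key₂ : List (String × String) → Nat)
    (xs : List (List (String × String))) :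
    ∀ (acc : Option (List (String × String))),
      (∀ s ∈ xs, key₁ s = key₂ s) →
      (∀ m, acc = some m → key₁ m = key₂ m) →
      xs.foldl (pvStep key₁) acc = xs.foldl (pvStep key₂) acc := by
  induction xs with
  | nil => intro acc _ _; rfl
  | cons x xs ih =>
      intro acc hmem hacc
      have hx : key₁ x = key₂ x := hmem x (by simp)
      have hstep : pvStep key₁ acc x = pvStep key₂ acc x := by
        cases acc with
        | none => rfl
        | some m => simp [pvStep, hx, hacc m rfl]
      simp only [List.foldl_cons, hstep]
      refine ih _ (fun s hs => hmem s (by simp [hs])) ?_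
      intro m hm
      cases acc with
      | none =>
          simp [pvStep] at hm; subst hm; exact hx
      | some m₀ =>
          simp only [pvStep] at hm
          by_cases hlt : key₂ x < key₂ m₀
          · rw [if_pos hlt] at hm; cases hm; exact hx
          · rw [if_neg hlt] at hm; cases hm; exact hacc _ rfl
-- shifting every key by one does not change the fold
theorem foldl_key_succ (key : List (String × String) → Nat)
    (xs : List (List (String × String))) :
    ∀ (acc : Option (List (String × String))),
      xs.foldl (pvStep (fun s => key s + 1)) acc = xs.foldl (pvStep key) acc := by
  induction xs with
  | nil => intro acc; rfl
  | cons x xs ih =>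
      intro acc
      have hstep : pvStep (fun s => key s + 1) acc x = pvStep key acc x := by
        cases acc with
        | none => rfl
        | some m => simp [pvStep]
      simp only [List.foldl_cons, hstep, ih]

-- a failed inner scan means no element matches p
theorem scanSources_none (p : String) :
    ∀ (xs : List (List (String × String))), pvScanSources p xs = none →
      ∀ s ∈ xs, pvMatch p s = false := by
  intro xs
  induction xs with
  | nil => intro _ s hs; simp at hs
  | cons x xs ih =>
      intro hscan s hs
      by_cases hx : pvMatch p x = true
      · simp [pvScanSources, hx] at hscan
      · rcases List.mem_cons.mp hs with rfl | hs'
        · simpa using hx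
        · exact ih (by simpa [pvScanSources, hx] using hscan) s hs'

-- if a source matching p lies ahead and the candidate does not match p, the fold finds the first match
theorem foldl_finds_first (p : String) (key : List (String × String) → Nat)
    (h0 : ∀ s, key s = 0 ↔ pvMatch p s = true) :
    ∀ (xs : List (List (String × String))) (b s₀ : List (String × String)),
      pvScanSources p xs = some s₀ → key b ≠ 0 →
      xs.foldl (pvStep key) (some b) = some s₀ := by
  intro xs
  induction xs with
  | nil => intro b s₀ h; simp [pvScanSources] at h
  | cons x xs ih =>
      intro b s₀ hscan hb
      by_cases hx : pvMatch p x = true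
      · have hx0 : key x = 0 := (h0 x).mpr hx
        have hs : s₀ = x := by
          simp [pvScanSources, hx] at hscan; exact hscan.symm
        subst hs
        have : pvStep key (some b) s₀ = some s₀ := by
          simp [pvStep, hx0, Nat.pos_of_ne_zero hb]
        simp only [List.foldl_cons, this]
        exact foldl_keep_zero key xs s₀ hx0
      · have hscan' : pvScanSources p xs = some s₀ := by
          simpa [pvScanSources, hx] using hscan
        have hxne : key x ≠ 0 := fun h => hx ((h0 x).mp h)
        have : ∃ c, pvStep key (some b) x = some c ∧ key c ≠ 0 := by
          by_cases hlt : key x < key b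
          · exact ⟨x, by simp [pvStep, hlt], hxne⟩
          · exact ⟨b, by simp [pvStep, hlt], hb⟩
        obtain ⟨c, hc, hcne⟩ := this
        simp only [List.foldl_cons, hc]
        exact ih c s₀ hscan' hcne

-- main loop-interchange lemma: A's preference-major scan (with sources[0] fallback)
-- equals min-by-rank for any preference list
theorem scan_eq_min (ps : List String) :
    ∀ (h : List (String × String)) (t : List (List (String × String))),
      (match pvScanPrefs ps (h :: t) with
       | some src => some src
       | none => some h) =
      (h :: t).foldl (pvStep (fun s => pvRank' s ps)) none := by
  induction ps with
  | nil =>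
      intro h t
      simp only [pvScanPrefs, List.foldl_cons, pvStep]
      exact (foldl_const_key (fun s => pvRank' s []) t h (fun s => rfl)).symm
  | cons p ps ih =>
      intro h t
      have h0 : ∀ s, (fun s => pvRank' s (p :: ps)) s = 0 ↔ pvMatch p s = true := by
        intro s
        by_cases hm : pvMatch p s = true <;> simp [pvRank', hm]
      cases hscan : pvScanSources p (h :: t) with
      | some s₀ =>
          simp only [pvScanPrefs, hscan]
          by_cases hh : pvMatch p h = true
          · have hs : s₀ = h := by simp [pvScanSources, hh] at hscan; exact hscan.symm
            subst hs
            have hh0 : pvRank' s₀ (p :: ps) = 0 := (h0 s₀).mpr hh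
            simp only [List.foldl_cons, pvStep]
            exact (foldl_keep_zero _ t s₀ hh0).symm
          · have hscan' : pvScanSources p t = some s₀ := by
              simpa [pvScanSources, hh] using hscan
            have hhne : pvRank' h (p :: ps) ≠ 0 := fun hz => hh ((h0 h).mp hz)
            simp only [List.foldl_cons, pvStep]
            exact (foldl_finds_first p _ h0 t h s₀ hscan' hhne).symm
      | none =>
          -- no source matches p: every rank is (rank over ps) + 1, so the fold is unchanged
          have hnone : ∀ s ∈ h :: t, pvMatch p s = false :=
            scanSources_none p (h :: t) hscan
          have hcongr :
              (h :: t).foldl (pvStep (fun s => pvRank' s (p :: ps))) none =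
              (h :: t).foldl (pvStep (fun s => pvRank' s ps + 1)) none := by
            refine foldl_key_congr _ _ (h :: t) none ?_ ?_
            · intro s hs
              simp [pvRank', hnone s hs]
            · intro m hm; cases hm
          simp only [pvScanPrefs, hscan]
          rw [ih h t, hcongr, foldl_key_succ]

-- ===== VERDICT (by name: the statement is the Claim_ definition above) =====
theorem pick_best_quality_spec : Claim_equal_pick_best_quality := by
  intro sources _
  unfold Spec_pick_best_quality
  cases sources with
  | nil => rfl
  | cons h t =>
      have hkey : pvRank = fun s => pvRank' s QUALITY_PREFERENCE := by
        funext s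
        rw [pvRank, pvRankGo_eq]
        omega
      show pick_best_quality (h :: t) = pick_best_quality_alt (h :: t)
      unfold pick_best_quality pick_best_quality_alt
      rw [min?_eq_foldl_pvStep, hkey]
      exact scan_eq_min QUALITY_PREFERENCE h t
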